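-- pv_equiv track=rewrite | github.com/Aashiq1/TripGenie | app/tools/tavily_itinerary_tool.py | _categorize_booking_links
-- ===== SOURCE A (Python) =====
-- from typing import Dict, List, Optional
--
-- def _categorize_booking_links(booking_links: List[Dict]) -> Dict:
--     """
--     Categorize booking links by platform for easy access.
--
--     Args:
--         booking_links: List of all booking links
--
--     Returns:
--         Links organized by platform
--     """
--     categorized = {}
--
--     for link in booking_links:
--         platform = link.get("platform", "Unknown")
--         if platform not in categorized:
--             categorized[platform] = []
--
--         categorized[platform].append({
--             "activity": link.get("activity"),
--             "url": link.get("url"),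
--             "price": link.get("price_info")
--         })
--
--     return categorized
-- ===== SOURCE B (Python) =====
-- from typing import Dict, List, Optional
--
-- def _categorize_booking_links(booking_links: List[Dict]) -> Dict:
--     """Group links by platform: collect the distinct platforms in first-appearance
--     order, then build each bucket with one filter pass over the whole list."""
--     platforms = list(dict.fromkeys(link.get("platform", "Unknown") for link in booking_links))
--     return {
--         p: [
--             {"activity": l.get("activity"), "url": l.get("url"), "price": l.get("price_info")}
--             for l in booking_links
--             if l.get("platform", "Unknown") == p
--         ]
--         for p in platforms
--     }
-- ===== Notes on version B (the rewrite author's own statement) =====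
-- stated objective: alternative
-- what changed: Replaces A's incremental first-appearance dict bucketing with a two-pass scheme: collect the distinct platforms once (dict.fromkeys), then build each bucket by one filter pass over the whole list.
import Mathlib
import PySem

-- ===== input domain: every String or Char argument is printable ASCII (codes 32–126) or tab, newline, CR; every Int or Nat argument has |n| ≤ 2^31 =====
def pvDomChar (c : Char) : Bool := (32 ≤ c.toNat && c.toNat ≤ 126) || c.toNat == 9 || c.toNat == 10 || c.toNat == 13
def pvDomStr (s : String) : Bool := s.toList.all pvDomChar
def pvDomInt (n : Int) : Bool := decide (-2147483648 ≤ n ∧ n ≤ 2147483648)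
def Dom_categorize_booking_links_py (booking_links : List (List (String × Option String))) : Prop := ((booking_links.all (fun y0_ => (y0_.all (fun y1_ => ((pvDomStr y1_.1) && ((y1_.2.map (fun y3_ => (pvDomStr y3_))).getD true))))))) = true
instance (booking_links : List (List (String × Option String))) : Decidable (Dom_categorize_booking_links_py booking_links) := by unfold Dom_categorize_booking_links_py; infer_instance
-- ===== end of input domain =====

-- B groups links by collecting the distinct platforms once and then making one filter pass per
-- platform, instead of A's incremental dict bucketing (alternative decomposition, not faster).

-- ===== PORT A =====
-- link.get("platform", "Unknown"); the outer .getD "Unknown" only fires when the stored value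
-- is none (Python would then key the bucket by None — excluded by Pre_ below).
def pvKey (link : List (String × Option String)) : String :=
  ((PySem.Dict.mk link).getD "platform" (some "Unknown")).getD "Unknown"

-- {"activity": link.get("activity"), "url": link.get("url"), "price": link.get("price_info")}
-- (.join: a stored None and a missing key both give Python None)
def pvEntry (link : List (String × Option String)) : List (String × Option String) :=
  [("activity", ((PySem.Dict.mk link).get? "activity").join),
   ("url", ((PySem.Dict.mk link).get? "url").join),
   ("price", ((PySem.Dict.mk link).get? "price_info").join)]

def categorize_booking_links_py (booking_links : List (List (String × Option String))) : List (String × List (List (String × Option String))) :=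
  (booking_links.foldl
    (fun categorized link =>
      let platform := pvKey link
      let categorized := if categorized.contains platform then categorized
                         else categorized.insert platform []
      categorized.insert platform (categorized.getD platform [] ++ [pvEntry link]))
    PySem.Dict.empty).items

-- ===== PORT B =====
def categorize_booking_links_py_alt (booking_links : List (List (String × Option String))) : List (String × List (List (String × Option String))) :=
  let platforms := PySem.List.dedup (booking_links.map pvKey)
  platforms.map (fun p =>
    (p, (booking_links.filter (fun l => pvKey l == p)).map pvEntry))

-- ===== PRECONDITION & SPEC =====
-- Pre_ excludes links whose "platform" key is present with value None: Python A then returns a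
-- dict keyed by None, which is not a value of the declared String-keyed return type.
def Pre_categorize_booking_links_py (booking_links : List (List (String × Option String))) : Prop :=
  ∀ link ∈ booking_links, (PySem.Dict.mk link).get? "platform" ≠ some none
instance (booking_links : List (List (String × Option String))) : Decidable (Pre_categorize_booking_links_py booking_links) := by unfold Pre_categorize_booking_links_py; infer_instance

def pvWitness_categorize_booking_links_py : (List (List (String × Option String))) :=
  [[("platform", some "GetYourGuide"), ("activity", some "City Tour"), ("url", some "http://x"), ("price_info", some "$10")],
   [("activity", some "Museum")]]

def Spec_categorize_booking_links_py (booking_links : List (List (String × Option String))) (out : List (String × List (List (String × Option String)))) : Prop := out = categorize_booking_links_py_alt booking_links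
instance (booking_links : List (List (String × Option String))) (out : List (String × List (List (String × Option String)))) : Decidable (Spec_categorize_booking_links_py booking_links out) := by unfold Spec_categorize_booking_links_py; infer_instance

-- ===== CLAIM (what is proved, stated in full; the proofs are below) =====
def Claim_equal_categorize_booking_links_py : Prop := ∀ (booking_links : List (List (String × Option String))), Dom_categorize_booking_links_py booking_links → Pre_categorize_booking_links_py booking_links → Spec_categorize_booking_links_py booking_links (categorize_booking_links_py booking_links)

-- ===== LEMMAS AND PROOFS =====

-- A's grouping dict equals B's map over the deduplicated platform list: A's loop body is
-- Dict.modify with default [], whose fold is characterised by keys_foldl_modify_key (keys =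
-- first-appearance distinct platforms) and getD_foldl_modify_append (bucket = filtered entries).
theorem main_eq (bl : List (List (String × Option String))) :
    categorize_booking_links_py bl = categorize_booking_links_py_alt bl := by
  unfold categorize_booking_links_py categorize_booking_links_py_alt
  have hfold : (bl.foldl
      (fun categorized link =>
        let platform := pvKey link
        let categorized := if categorized.contains platform then categorized
                           else categorized.insert platform []
        categorized.insert platform (categorized.getD platform [] ++ [pvEntry link]))
      PySem.Dict.empty)
      = (bl.map (fun l => (pvKey l, pvEntry l))).foldl
          (fun d x => d.modify x.1 [] (· ++ [x.2])) PySem.Dict.empty := by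
    rw [List.foldl_map]
    congr 1
    funext cat link
    by_cases h : cat.contains (pvKey link) = true
    · simp [h, PySem.Dict.modify, PySem.Dict.getD_eq_get?_getD]
    · have hn : cat.get? (pvKey link) = none := by
        rw [← Option.not_isSome_iff_eq_none, ← PySem.Dict.contains_eq_isSome_get?]; simpa using h
      simp [h, PySem.Dict.modify, PySem.Dict.insert_insert_self, PySem.Dict.getD_eq_get?_getD, hn]
  rw [hfold]
  set pairs := bl.map (fun l => (pvKey l, pvEntry l)) with hpairs
  set D := pairs.foldl (fun d x => d.modify x.1 [] (· ++ [x.2])) PySem.Dict.empty with hD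
  have hnodup : D.keys.Nodup :=
    PySem.Dict.nodup_keys_foldl_modify_key pairs Prod.fst [] (fun d x => (· ++ [x.2]))
      PySem.Dict.empty PySem.Dict.nodup_keys_empty
  have hkeys : D.keys = PySem.List.dedup (bl.map pvKey) := by
    rw [hD, PySem.Dict.keys_foldl_modify_key]
    simp [hpairs, List.map_map, Function.comp_def, PySem.Set.update, PySem.List.dedup_eq_ofList,
      PySem.Set.ofList_eq_foldl, PySem.Dict.keys_empty]
  have hgetD : ∀ c, D.getD c [] = (bl.filter (fun l => pvKey l == c)).map pvEntry := by
    intro c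
    rw [hD, PySem.Dict.getD_foldl_modify_append]
    simp [hpairs, List.filter_map, Function.comp_def, List.map_map, PySem.Dict.getD_empty]
  rw [PySem.Dict.items_eq_map_keys D hnodup [], hkeys]
  apply List.map_congr_left
  intro p hp
  simp [hgetD p]

-- ===== VERDICT (by name: the statement is the Claim_ definition above) =====
theorem categorize_booking_links_py_spec : Claim_equal_categorize_booking_links_py := by
  intro bl _ _
  exact main_eq bl
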